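-- pv_equiv track=rewrite | github.com/Yoann-Merle/AOC | 2019/24/program.py | biodiversity
-- ===== SOURCE A (Python) =====
-- def biodiversity(matrice):
--         point = 1
--         rating = 0
--         for y in range(len(matrice)):
--                 for x in range(len(matrice[0])):
--                         if matrice[y][x] == 1:
--                                 rating += point
--                         point *= 2
--         return rating
-- ===== SOURCE B (Python) =====
-- def biodiversity(matrice):
--     bits = []
--     for y in range(len(matrice)):
--         for x in range(len(matrice[0])):
--             bits.append('1' if matrice[y][x] == 1 else '0')
--     if not bits:
--         return 0
--     return int(''.join(reversed(bits)), 2)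
-- ===== Notes on version B (the rewrite author's own statement) =====
-- stated objective: idiomatic
-- what changed: Instead of threading a doubling power-of-two big-integer accumulator through the scan, B collects the grid as a list of '0'/'1' characters and converts the reversed bit string to an integer with one int(s, 2) call.
import Mathlib
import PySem

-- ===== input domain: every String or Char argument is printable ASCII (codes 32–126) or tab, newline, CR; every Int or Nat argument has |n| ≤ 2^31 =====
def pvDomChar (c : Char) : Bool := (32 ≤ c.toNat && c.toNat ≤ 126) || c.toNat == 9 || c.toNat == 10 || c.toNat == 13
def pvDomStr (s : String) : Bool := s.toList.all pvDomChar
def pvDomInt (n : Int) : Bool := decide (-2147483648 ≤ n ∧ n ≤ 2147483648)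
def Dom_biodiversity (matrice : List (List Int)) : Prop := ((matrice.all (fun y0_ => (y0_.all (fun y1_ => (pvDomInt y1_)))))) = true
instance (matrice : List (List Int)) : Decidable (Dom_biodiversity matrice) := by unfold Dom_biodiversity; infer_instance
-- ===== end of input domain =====

-- B replaces A's doubling point/rating accumulator by collecting the grid as a reversed
-- bit string parsed with int(s, 2) (ported by hand, exact for '0'/'1' strings): more idiomatic.


-- ===== PORT A =====
def biodiversity (matrice : List (List Int)) : Int :=
  -- point = 1; rating = 0; nested for-loops over ranges, indexing via pyGetD (in range under Pre_)
  (((PySem.List.pyRange 0 (matrice.length : Int) 1).foldl (fun (pr : Int × Int) y =>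
      (PySem.List.pyRange 0 ((PySem.List.pyGetD matrice 0 []).length : Int) 1).foldl
        (fun (pr : Int × Int) x =>
          (pr.1 * 2,
           if PySem.List.pyGetD (PySem.List.pyGetD matrice y []) x 0 = 1
           then pr.2 + pr.1 else pr.2)) pr) ((1 : Int), (0 : Int)))).2

-- ===== PORT B =====
def biodiversity_alt (matrice : List (List Int)) : Int :=
  -- bits = []; nested loops appending '1'/'0'; then int(''.join(reversed(bits)), 2)
  let bits : List Char :=
    (PySem.List.pyRange 0 (matrice.length : Int) 1).foldl (fun (bits : List Char) y =>
      (PySem.List.pyRange 0 ((PySem.List.pyGetD matrice 0 []).length : Int) 1).foldl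
        (fun (bits : List Char) x =>
          bits ++ [if PySem.List.pyGetD (PySem.List.pyGetD matrice y []) x 0 = 1
                   then '1' else '0']) bits) []
  if bits = [] then 0
  else
    -- int(s, 2) ported by hand; exact for strings of '0'/'1' characters, which is all bits holds
    bits.reverse.foldl (fun acc c => acc * 2 + (if c = '1' then 1 else 0)) 0

-- ===== PRECONDITION & SPEC =====
-- Pre_ excludes ragged grids whose first row is longer than some later row: there Python A
-- (and B) raises IndexError on matrice[y][x].
def Pre_biodiversity (matrice : List (List Int)) : Prop :=
  ∀ row ∈ matrice, (matrice.headD []).length ≤ row.length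
instance (matrice : List (List Int)) : Decidable (Pre_biodiversity matrice) := by
  unfold Pre_biodiversity; infer_instance
def pvWitness_biodiversity : List (List Int) := [[1, 0], [0, 1]]
def Spec_biodiversity (matrice : List (List Int)) (out : Int) : Prop := out = biodiversity_alt matrice
instance (matrice : List (List Int)) (out : Int) : Decidable (Spec_biodiversity matrice out) := by unfold Spec_biodiversity; infer_instance

-- ===== CLAIM (what is proved, stated in full; the proofs are below) =====
def Claim_equal_biodiversity : Prop := ∀ (matrice : List (List Int)), Dom_biodiversity matrice → Pre_biodiversity matrice → Spec_biodiversity matrice (biodiversity matrice)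

-- ===== LEMMAS AND PROOFS =====

-- the cells A's scan reads from one row, given the inner bound w = len(matrice[0])
def pvRowCells (w : Nat) (row : List Int) : List Int :=
  (PySem.List.pyRange 0 (w : Int) 1).map (fun x => PySem.List.pyGetD row x 0)

-- the LSB-first value of a cell sequence
def pvVal (cs : List Int) : Int :=
  cs.foldr (fun c a => a * 2 + (if c = (1 : Int) then 1 else 0)) 0

theorem pvFoldA (cs : List Int) (p r : Int) :
    cs.foldl (fun (pr : Int × Int) c =>
        (pr.1 * 2, if c = (1 : Int) then pr.2 + pr.1 else pr.2)) (p, r)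
      = (p * 2 ^ cs.length, r + p * pvVal cs) := by
  induction cs generalizing p r with
  | nil => simp [pvVal]
  | cons c cs ih =>
    simp only [List.foldl_cons, ih, List.length_cons, Prod.mk.injEq]
    have hv : pvVal (c :: cs) = pvVal cs * 2 + (if c = (1 : Int) then 1 else 0) := rfl
    rw [hv]
    refine ⟨by ring, ?_⟩
    split_ifs <;> ring

theorem pvFoldlFlatMap {α β : Type} (l : List α) (f : α → List β)
    (g : Int × Int → β → Int × Int) (init : Int × Int) :
    l.foldl (fun acc x => (f x).foldl g acc) init = (l.flatMap f).foldl g init := by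
  induction l generalizing init with
  | nil => simp
  | cons a l ih => simp [List.foldl_append, ih]

theorem pvBitsEq (rows : List (List Int)) (w : Nat) (init : List Char) :
    rows.foldl (fun (bits : List Char) y =>
        (PySem.List.pyRange 0 (w : Int) 1).foldl
          (fun (bits : List Char) x =>
            bits ++ [if PySem.List.pyGetD y x 0 = 1 then '1' else '0']) bits) init
      = init ++ (rows.flatMap (pvRowCells w)).map
          (fun c => if c = (1 : Int) then '1' else '0') := by
  induction rows generalizing init with
  | nil => simp
  | cons row rows ih =>
    simp only [List.foldl_cons, ih, List.flatMap_cons, List.map_append, ← List.append_assoc]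
    congr 1
    rw [PySem.List.foldl_append_singleton_eq_map]
    simp [pvRowCells, List.map_map, Function.comp]

theorem pvParseEq (cs : List Int) :
    ((cs.map (fun c => if c = (1 : Int) then '1' else '0')).reverse.foldl
        (fun (acc : Int) c => acc * 2 + (if c = '1' then 1 else 0)) 0) = pvVal cs := by
  rw [List.foldl_reverse]
  induction cs with
  | nil => simp [pvVal]
  | cons c cs ih =>
    simp only [List.map_cons, List.foldr_cons, ih]
    have hv : pvVal (c :: cs) = pvVal cs * 2 + (if c = (1 : Int) then 1 else 0) := rfl
    rw [hv]
    by_cases h : c = (1 : Int) <;> simp [h]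

theorem pvAltVal (matrice : List (List Int)) :
    biodiversity_alt matrice
      = pvVal (matrice.flatMap (pvRowCells (PySem.List.pyGetD matrice 0 []).length)) := by
  simp only [biodiversity_alt]
  rw [PySem.List.foldl_pyRange_zero_pyGetD' matrice ([] : List Int)
      (fun (bits : List Char) (row : List Int) =>
        (PySem.List.pyRange 0 ((PySem.List.pyGetD matrice 0 []).length : Int) 1).foldl
          (fun (bits : List Char) x =>
            bits ++ [if PySem.List.pyGetD row x 0 = 1 then '1' else '0']) bits) []]
  rw [pvBitsEq matrice _ []]
  simp only [List.nil_append]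
  set cs := matrice.flatMap (pvRowCells (PySem.List.pyGetD matrice 0 []).length) with hcs
  by_cases h : cs = []
  · simp [h, pvVal]
  · rw [if_neg (by simpa using h), pvParseEq]

theorem pvAVal (matrice : List (List Int)) :
    biodiversity matrice
      = pvVal (matrice.flatMap (pvRowCells (PySem.List.pyGetD matrice 0 []).length)) := by
  simp only [biodiversity]
  rw [PySem.List.foldl_pyRange_zero_pyGetD' matrice ([] : List Int)
      (fun (pr : Int × Int) (row : List Int) =>
        (PySem.List.pyRange 0 ((PySem.List.pyGetD matrice 0 []).length : Int) 1).foldl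
          (fun (pr : Int × Int) x =>
            (pr.1 * 2,
             if PySem.List.pyGetD row x 0 = 1 then pr.2 + pr.1 else pr.2)) pr) ((1 : Int), (0 : Int))]
  have hrow : ∀ (row : List Int) (pr : Int × Int),
      (PySem.List.pyRange 0 ((PySem.List.pyGetD matrice 0 []).length : Int) 1).foldl
        (fun (pr : Int × Int) x =>
          (pr.1 * 2, if PySem.List.pyGetD row x 0 = 1 then pr.2 + pr.1 else pr.2)) pr
      = (pvRowCells (PySem.List.pyGetD matrice 0 []).length row).foldl
          (fun (pr : Int × Int) c =>
            (pr.1 * 2, if c = (1 : Int) then pr.2 + pr.1 else pr.2)) pr := by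
    intro row pr
    rw [pvRowCells, List.foldl_map]
  calc (matrice.foldl (fun (pr : Int × Int) row =>
          (PySem.List.pyRange 0 ((PySem.List.pyGetD matrice 0 []).length : Int) 1).foldl
            (fun (pr : Int × Int) x =>
              (pr.1 * 2, if PySem.List.pyGetD row x 0 = 1 then pr.2 + pr.1 else pr.2)) pr)
          ((1 : Int), (0 : Int))).2
      = (matrice.foldl (fun (pr : Int × Int) row =>
          (pvRowCells (PySem.List.pyGetD matrice 0 []).length row).foldl
            (fun (pr : Int × Int) c =>
              (pr.1 * 2, if c = (1 : Int) then pr.2 + pr.1 else pr.2)) pr)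
          ((1 : Int), (0 : Int))).2 := by
        congr 1
        exact PySem.List.foldl_congr_mem matrice _ _ _ (fun pr row _ => hrow row pr)
    _ = _ := by
        rw [pvFoldlFlatMap, pvFoldA]
        simp

-- ===== VERDICT (by name: the statement is the Claim_ definition above) =====
theorem biodiversity_spec : Claim_equal_biodiversity := by
  intro matrice _ _
  unfold Spec_biodiversity
  rw [pvAVal, pvAltVal]
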